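-- pv_equiv track=rewrite | github.com/devrafael7/python-exercises | ex03/main.py | alternation
-- ===== SOURCE A (Python) =====
-- def alternation(max):
--     x = 0
--     result = []
--
--     while x < max:
--         if x % 2 == 0:
--             result.append("even")
--         else:
--             result.append("odd")
--         x = x + 1
--     return(result)
-- ===== SOURCE B (Python) =====
-- def alternation(max):
--     n = max if max > 0 else 0
--     return ["even", "odd"] * (n // 2) + (["even"] if n % 2 else [])
-- ===== Notes on version B (the rewrite author's own statement) =====
-- stated objective: simpler
-- what changed: Replaces the while-loop with a per-element parity branch by closed-form block replication: the pair ['even','odd'] repeated half the clamped count, plus one trailing 'even' when the count is odd.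
import Mathlib
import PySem

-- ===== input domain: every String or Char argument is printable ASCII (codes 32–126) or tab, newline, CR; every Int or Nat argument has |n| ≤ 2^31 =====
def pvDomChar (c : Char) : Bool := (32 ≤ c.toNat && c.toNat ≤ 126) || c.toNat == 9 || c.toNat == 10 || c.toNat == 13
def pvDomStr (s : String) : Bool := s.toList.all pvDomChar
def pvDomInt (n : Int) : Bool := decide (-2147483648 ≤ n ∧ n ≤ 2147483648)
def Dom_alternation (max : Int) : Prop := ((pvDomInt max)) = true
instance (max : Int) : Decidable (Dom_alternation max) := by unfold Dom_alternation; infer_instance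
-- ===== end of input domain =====

-- B replaces A's while-loop with a parity branch by closed-form block replication (objective: simpler).

-- ===== PORT A =====
-- while x < max, appending "even"/"odd" by parity of x; the loop is the fold over range(0, max)
def alternation (max : Int) : List String :=
  (PySem.List.pyRange 0 max 1).foldl
    (fun result x => result ++ [if PySem.Int.mod x 2 = 0 then "even" else "odd"]) []

-- ===== PORT B =====
def alternation_alt (max : Int) : List String :=
  let n : Nat := max.toNat
  List.flatten (List.replicate (n / 2) ["even", "odd"]) ++
    (if n % 2 = 1 then ["even"] else [])

-- ===== PRECONDITION & SPEC =====
def Spec_alternation (max : Int) (out : List String) : Prop := out = alternation_alt max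
instance (max : Int) (out : List String) : Decidable (Spec_alternation max out) := by unfold Spec_alternation; infer_instance

-- ===== CLAIM (what is proved, stated in full; the proofs are below) =====
def Claim_equal_alternation : Prop := ∀ (max : Int), Dom_alternation max → Spec_alternation max (alternation max)

-- ===== LEMMAS AND PROOFS =====

-- the block form, as a function of the (clamped, natural) count
def pvBlk (n : Nat) : List String :=
  List.flatten (List.replicate (n / 2) ["even", "odd"]) ++
    (if n % 2 = 1 then ["even"] else [])

lemma pvBlk_succ (n : Nat) :
    pvBlk (n + 1) = pvBlk n ++ [if n % 2 = 0 then "even" else "odd"] := by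
  rcases Nat.even_or_odd n with ⟨k, hk⟩ | ⟨k, hk⟩
  · subst hk
    have h1 : (k + k + 1) / 2 = k := by omega
    have h2 : (k + k + 1) % 2 = 1 := by omega
    have h3 : (k + k) / 2 = k := by omega
    have h4 : (k + k) % 2 = 0 := by omega
    simp [pvBlk, h1, h2, h3, h4]
  · subst hk
    have h1 : (2 * k + 1 + 1) / 2 = k + 1 := by omega
    have h2 : (2 * k + 1 + 1) % 2 = 0 := by omega
    have h3 : (2 * k + 1) / 2 = k := by omega
    have h4 : (2 * k + 1) % 2 = 1 := by omega
    simp [pvBlk, h1, h2, h3, h4, List.replicate_succ', List.flatten_append]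

lemma pvMod_cast (n : Nat) : PySem.Int.mod (n : Int) 2 = ((n % 2 : Nat) : Int) := by
  have h : ((n : Int)).fmod 2 = (n : Int) % 2 := by
    rw [Int.fmod_eq_emod]; simp
  simp [PySem.Int.mod, h]

lemma pvFold_range (n : Nat) :
    (PySem.List.pyRange 0 (n : Int) 1).foldl
      (fun result x => result ++ [if PySem.Int.mod x 2 = 0 then "even" else "odd"]) []
      = pvBlk n := by
  induction n with
  | zero => simp [PySem.List.pyRange_one_eq_nil, pvBlk]
  | succ m ih =>
    have hs : PySem.List.pyRange 0 ((m : Int) + 1) 1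
        = PySem.List.pyRange 0 (m : Int) 1 ++ [(m : Int)] :=
      PySem.List.pyRange_one_succ_right (by positivity)
    have hcast : ((m : Int) + 1) = ((m + 1 : Nat) : Int) := by push_cast; ring
    rw [← hcast, hs, List.foldl_append, ih, pvBlk_succ]
    simp only [List.foldl_cons, List.foldl_nil, pvMod_cast]
    rcases Nat.even_or_odd m with ⟨k, hk⟩ | ⟨k, hk⟩ <;> subst hk
    · have : (k + k) % 2 = 0 := by omega
      simp [this]
    · have : (2 * k + 1) % 2 = 1 := by omega
      simp [this]

-- ===== VERDICT (by name: the statement is the Claim_ definition above) =====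
theorem alternation_spec : Claim_equal_alternation := by
  intro max _
  unfold Spec_alternation alternation alternation_alt
  show _ = pvBlk max.toNat
  rcases le_or_gt max 0 with h | h
  · rw [PySem.List.pyRange_one_eq_nil (by omega)]
    have : max.toNat = 0 := by omega
    simp [this, pvBlk]
  · have : max = (max.toNat : Int) := by omega
    rw [this, pvFold_range]
    congr 1
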